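-- pv_equiv track=rewrite | github.com/Alexander-Cardona-Herrera/holbertonschool-interview | 0x03-minimum_operations/0-minoperations.py | minOperations
-- ===== SOURCE A (Python) =====
-- def minOperations(n):
--     """
--     Function that finds le minimum number of operations to get n amount of Hs
--     """
--     if type(n) is not int:
--         return 0
--     if n <= 1:
--         return 0
--
--     alx = 0
--     chars = 1
--     copy = 1
--
--     while chars < n:
--         if n % chars == 0:
--             copy = chars
--             alx += 1
--         if chars != n:
--             chars += copy
--             alx += 1
--         else:
--             break
--
--     return alx
-- ===== SOURCE B (Python) =====
-- def minOperations(n):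
--     """Minimum copy-paste operations: sum of the prime factors of n (trial division)."""
--     if type(n) is not int:
--         return 0
--     if n <= 1:
--         return 0
--     total = 0
--     p = 2
--     m = n
--     while p * p <= m:
--         while m % p == 0:
--             total += p
--             m //= p
--         p += 1
--     if m > 1:
--         total += m
--     return total
-- ===== Notes on version B (the rewrite author's own statement) =====
-- stated objective: faster
-- what changed: A simulates the copy-paste process character count by character count (O(n) loop iterations); B computes the same answer as the sum of n's prime factors by trial division up to sqrt(n).
import Mathlib
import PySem

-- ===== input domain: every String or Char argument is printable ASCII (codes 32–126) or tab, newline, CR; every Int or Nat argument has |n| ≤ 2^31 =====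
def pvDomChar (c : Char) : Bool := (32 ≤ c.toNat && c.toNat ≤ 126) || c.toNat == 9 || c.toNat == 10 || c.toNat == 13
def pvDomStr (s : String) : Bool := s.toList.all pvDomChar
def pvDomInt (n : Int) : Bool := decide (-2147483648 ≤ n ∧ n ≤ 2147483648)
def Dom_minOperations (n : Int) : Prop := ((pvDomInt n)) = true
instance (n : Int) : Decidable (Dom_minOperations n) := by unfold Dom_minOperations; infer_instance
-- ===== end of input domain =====

-- B replaces A's O(n) copy/paste simulation by summing the prime factors of n via trial division (O(√n)).

-- ===== PORT A =====
-- A's while loop, transliterated with a fuel counter (fuel n.toNat is enough: chars grows by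
-- copy ≥ 1 each iteration).  The loop runs on Nat: the wrapper only enters it with n ≥ 2, and
-- there every quantity (n, chars, copy) stays positive, where Nat `%`, `+`, `<` coincide with
-- Python's semantics exactly.
def pvALoop (n : Nat) : Nat → Nat → Nat → Nat → Nat
  | 0, alx, _, _ => alx
  | fuel + 1, alx, chars, copy =>
    if chars < n then
      let copy' := if n % chars = 0 then chars else copy
      let alx'  := if n % chars = 0 then alx + 1 else alx
      if chars ≠ n then pvALoop n fuel (alx' + 1) (chars + copy') copy'
      else alx'
    else alx

def minOperations (n : Int) : Int :=
  -- `type(n) is not int` is always false under the Int typing of the port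
  if n ≤ 1 then 0 else Int.ofNat (pvALoop n.toNat n.toNat 0 1 1)

-- ===== PORT B =====
-- inner `while m % p == 0: total += p; m //= p`  (fuel m is enough: m shrinks each division)
def pvBInner (p : Nat) : Nat → Nat → Nat → Nat × Nat
  | 0, m, total => (m, total)
  | fuel + 1, m, total =>
    if m % p = 0 then pvBInner p fuel (m / p) (total + p) else (m, total)

-- outer `while p * p <= m`, followed by `if m > 1: total += m` on exit
def pvBOuter : Nat → Nat → Nat → Nat → Nat
  | 0, m, _, total => if 1 < m then total + m else total
  | fuel + 1, m, p, total =>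
    if p * p ≤ m then
      let r := pvBInner p m m total
      pvBOuter fuel r.1 (p + 1) r.2
    else if 1 < m then total + m else total

def minOperations_alt (n : Int) : Int :=
  if n ≤ 1 then 0 else Int.ofNat (pvBOuter n.toNat n.toNat 2 0)

-- ===== PRECONDITION & SPEC =====
def Spec_minOperations (n : Int) (out : Int) : Prop := out = minOperations_alt n
instance (n : Int) (out : Int) : Decidable (Spec_minOperations n out) := by unfold Spec_minOperations; infer_instance

-- ===== CLAIM (what is proved, stated in full; the proofs are below) =====
def Claim_equal_minOperations : Prop := ∀ (n : Int), Dom_minOperations n → Spec_minOperations n (minOperations n)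

-- ===== LEMMAS AND PROOFS =====

/-- Common value both loops compute for n ≥ 2: the sum of the prime factors of n. -/
def sumPF (m : Nat) : Nat := (Nat.primeFactorsList m).sum

theorem sumPF_one : sumPF 1 = 0 := by simp [sumPF, Nat.primeFactorsList_one]

theorem sumPF_eq (m : Nat) (h : 2 ≤ m) :
    sumPF m = m.minFac + sumPF (m / m.minFac) := by
  obtain ⟨k, rfl⟩ : ∃ k, m = k + 2 := ⟨m - 2, by omega⟩
  simp [sumPF, Nat.primeFactorsList]

theorem sumPF_prime {p : Nat} (hp : p.Prime) : sumPF p = p := by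
  simp [sumPF, Nat.primeFactorsList_prime hp]

-- ---- A side: the least divisor e of n with c ≤ e and d ∣ e (n + 1 pads totality) ----
def pvEex (n c d : Nat) : ∃ e, (e ∣ n ∧ c ≤ e ∧ d ∣ e) ∨ n < e := ⟨n + 1, Or.inr (Nat.lt_succ_self n)⟩

def pvE (n c d : Nat) : Nat := Nat.find (pvEex n c d)

theorem pvE_min {n c d e : Nat} (he : e ∣ n) (hce : c ≤ e) (hde : d ∣ e) : pvE n c d ≤ e :=
  Nat.find_min' (pvEex n c d) (Or.inl ⟨he, hce, hde⟩)

theorem pvE_le {n c d : Nat} (hd : d ∣ n) (hc : c ≤ n) : pvE n c d ≤ n :=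
  pvE_min (dvd_refl n) hc hd

theorem pvE_spec {n c d : Nat} (hd : d ∣ n) (hc : c ≤ n) :
    pvE n c d ∣ n ∧ c ≤ pvE n c d ∧ d ∣ pvE n c d := by
  have h := Nat.find_spec (pvEex n c d)
  have hle := pvE_le hd hc
  rcases h with h | h
  · exact h
  · exact absurd h (not_lt.2 hle)

theorem pvE_eq_self {n c d : Nat} (hc : c ∣ n) (hdc : d ∣ c) (hcn : c ≤ n) : pvE n c d = c :=
  le_antisymm (pvE_min hc le_rfl hdc) (pvE_spec (hdc.trans hc) hcn).2.1

theorem pvE_ge {n c d : Nat} (hnd : ¬ c ∣ n) (hd : d ∣ n) (hc : c ≤ n) (hdc : d ∣ c)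
    (_hd1 : 1 ≤ d) : c + d ≤ pvE n c d := by
  obtain ⟨hEn, hcE, hdE⟩ := pvE_spec hd hc
  have hne : pvE n c d ≠ c := fun h => hnd (h ▸ hEn)
  have hlt : c < pvE n c d := lt_of_le_of_ne hcE (Ne.symm hne)
  have hdvd : d ∣ pvE n c d - c := Nat.dvd_sub hdE hdc
  have := Nat.le_of_dvd (by omega) hdvd
  omega

theorem pvE_shift {n c d : Nat} (hnd : ¬ c ∣ n) (hd : d ∣ n) (hc : c ≤ n) (hdc : d ∣ c)
    (hd1 : 1 ≤ d) : pvE n (c + d) d = pvE n c d := by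
  have hge := pvE_ge hnd hd hc hdc hd1
  have hle := pvE_le hd hc
  obtain ⟨hEn, hcE, hdE⟩ := pvE_spec hd hc
  obtain ⟨hEn', hcE', hdE'⟩ := pvE_spec hd (le_trans hge hle)
  exact le_antisymm (pvE_min hEn hge hdE) (pvE_min hEn' (by omega) hdE')

theorem pvE_two {n c : Nat} (hc : c ∣ n) (hlt : c < n) (hc1 : 1 ≤ c) :
    pvE n (c + c) c = c * Nat.minFac (n / c) := by
  obtain ⟨m, rfl⟩ := hc
  have hm2 : 2 ≤ m := by
    rcases Nat.lt_or_ge m 2 with h | h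
    · interval_cases m <;> omega
    · exact h
  have hmc : (c * m) / c = m := Nat.mul_div_cancel_left m (by omega)
  rw [hmc]
  set p := Nat.minFac m with hp
  have hpm : p ∣ m := Nat.minFac_dvd m
  have hp2 : 2 ≤ p := (Nat.minFac_prime (by omega)).two_le
  have h2cm : c + c ≤ c * m := by nlinarith [Nat.mul_le_mul_left c hm2]
  have h2cp : c + c ≤ c * p := by nlinarith [Nat.mul_le_mul_left c hp2]
  apply le_antisymm
  · exact pvE_min (mul_dvd_mul_left c hpm) h2cp (Dvd.intro p rfl)
  · obtain ⟨hEn, hcE, hdE⟩ := pvE_spec (n := c * m) (c := c + c) (d := c) (Dvd.intro m rfl) h2cm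
    obtain ⟨k, hkE⟩ := hdE
    rw [hkE] at hEn hcE ⊢
    have hkm : k ∣ m := (mul_dvd_mul_iff_left (by omega : c ≠ 0)).1 hEn
    have hk2 : 2 ≤ k := by nlinarith [Nat.mul_le_mul_left c hm2]
    exact Nat.mul_le_mul_left c (Nat.minFac_le_of_dvd hk2 hkm)

/-- A's loop, from any reachable state, adds the paste-steps to the next divisor `pvE n c d`
    plus the operations for the remaining factor `n / pvE n c d`. -/
theorem aLoop_spec (n : Nat) : ∀ fuel c d alx, 1 ≤ d → 1 ≤ c → d ∣ n → d ∣ c → c ≤ n →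
    n - c ≤ fuel →
    pvALoop n fuel alx c d = alx + (pvE n c d - c) / d + sumPF (n / pvE n c d) := by
  intro fuel
  induction fuel with
  | zero =>
    intro c d alx hd1 hc1 hdn hdc hcn hfuel
    have hceq : c = n := by omega
    subst hceq
    rw [pvE_eq_self (dvd_refl c) hdc le_rfl]
    simp [pvALoop, Nat.div_self (by omega : 0 < c), sumPF_one]
  | succ fuel ih =>
    intro c d alx hd1 hc1 hdn hdc hcn hfuel
    by_cases hlt : c < n
    · by_cases hdvd : c ∣ n
      · have hmod : n % c = 0 := Nat.dvd_iff_mod_eq_zero.mp hdvd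
        obtain ⟨m, hm⟩ := hdvd
        have hm2 : 2 ≤ m := by nlinarith
        have h2cn : c + c ≤ n := by nlinarith
        have hih := ih (c + c) c (alx + 1 + 1) hc1 (by omega) ⟨m, hm⟩
          (Dvd.intro 2 (by ring)) h2cn (by omega)
        have hstep : pvALoop n (fuel + 1) alx c d = pvALoop n fuel (alx + 1 + 1) (c + c) c := by
          rw [pvALoop, if_pos hlt]
          simp only [if_pos hmod]
          rw [if_pos (show ¬ c = n by omega)]
        rw [hstep, hih, pvE_two ⟨m, hm⟩ hlt hc1, pvE_eq_self ⟨m, hm⟩ hdc (by omega),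
          Nat.sub_self, Nat.zero_div]
        have hnc : n / c = m := by rw [hm, Nat.mul_div_cancel_left m (by omega)]
        set p := Nat.minFac (n / c) with hpdef
        have hp2 : 2 ≤ p := by
          rw [hpdef, hnc]; exact (Nat.minFac_prime (by omega)).two_le
        have hsub : c * p - (c + c) = c * (p - 2) := by
          rw [Nat.mul_sub]; omega
        have hdivsub : (c * p - (c + c)) / c = p - 2 := by
          rw [hsub, Nat.mul_div_cancel_left (p - 2) (by omega)]
        have hdd : n / (c * p) = (n / c) / p := by
          rw [Nat.div_div_eq_div_mul]
        have hsum : sumPF (n / c) = p + sumPF ((n / c) / p) := by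
          rw [sumPF_eq (n / c) (by omega), ← hpdef]
        rw [hdivsub, hdd, hsum]
        omega
      · have hmod : ¬ n % c = 0 := fun h => hdvd (Nat.dvd_iff_mod_eq_zero.mpr h)
        have hge := pvE_ge hdvd hdn (by omega) hdc hd1
        have hle := pvE_le hdn (by omega)
        have hih := ih (c + d) d (alx + 1) hd1 (by omega) hdn (dvd_add hdc dvd_rfl)
          (by omega) (by omega)
        have hstep : pvALoop n (fuel + 1) alx c d = pvALoop n fuel (alx + 1) (c + d) d := by
          rw [pvALoop, if_pos hlt]
          simp only [if_neg hmod]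
          rw [if_pos (show ¬ c = n by omega)]
        rw [hstep, hih, pvE_shift hdvd hdn (by omega) hdc hd1]
        have hdE : d ∣ pvE n c d - c := Nat.dvd_sub (pvE_spec hdn (by omega)).2.2 hdc
        obtain ⟨k, hk⟩ := hdE
        have hk1 : 1 ≤ k := by
          rcases Nat.eq_zero_or_pos k with h0 | h0
          · rw [h0, Nat.mul_zero] at hk; omega
          · exact h0
        have h1 : pvE n c d - c - d = d * (k - 1) := by rw [Nat.mul_sub]; omega
        have h2 : (pvE n c d - (c + d)) / d = k - 1 := by
          rw [show pvE n c d - (c + d) = d * (k - 1) by omega, Nat.mul_div_cancel_left _ (by omega)]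
        have h3 : (pvE n c d - c) / d = k := by
          rw [hk, Nat.mul_div_cancel_left _ (by omega)]
        rw [h2, h3]
        omega
    · have hceq : c = n := by omega
      subst hceq
      rw [pvE_eq_self (dvd_refl c) hdc le_rfl]
      simp [pvALoop, Nat.div_self (by omega : 0 < c), sumPF_one]

-- ---- B side ----
theorem bInner_spec (p : Nat) (hp2 : 2 ≤ p) : ∀ fuel m total, 1 ≤ m → m ≤ fuel →
    (∀ q, 2 ≤ q → q < p → ¬ q ∣ m) →
    1 ≤ (pvBInner p fuel m total).1 ∧ (pvBInner p fuel m total).1 ≤ m ∧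
    (∀ q, 2 ≤ q → q < p + 1 → ¬ q ∣ (pvBInner p fuel m total).1) ∧
    (pvBInner p fuel m total).2 + sumPF (pvBInner p fuel m total).1 = total + sumPF m := by
  intro fuel
  induction fuel with
  | zero => intro m total hm1 hmf _; exact absurd hmf (by omega)
  | succ fuel ih =>
    intro m total hm1 hmf hnodvd
    rw [pvBInner]
    by_cases hdvd : p ∣ m
    · have hmod : m % p = 0 := Nat.dvd_iff_mod_eq_zero.mp hdvd
      rw [if_pos hmod]
      have hm2 : 2 ≤ m := le_trans hp2 (Nat.le_of_dvd (by omega) hdvd)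
      have hminfac : m.minFac = p := by
        have h1 : m.minFac ≤ p := Nat.minFac_le_of_dvd hp2 hdvd
        have h2 : 2 ≤ m.minFac := (Nat.minFac_prime (by omega)).two_le
        by_contra hne
        exact hnodvd m.minFac h2 (by omega) (Nat.minFac_dvd m)
      have hdiv1 : 1 ≤ m / p := Nat.one_le_div_iff (by omega) |>.2 (Nat.le_of_dvd (by omega) hdvd)
      have hdivlt : m / p < m := Nat.div_lt_self (by omega) (by omega)
      have hnodvd' : ∀ q, 2 ≤ q → q < p → ¬ q ∣ m / p := fun q hq2 hqp hqdvd =>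
        hnodvd q hq2 hqp (hqdvd.trans (Nat.div_dvd_of_dvd hdvd))
      obtain ⟨h1, h2, h3, h4⟩ := ih (m / p) (total + p) hdiv1 (by omega) hnodvd'
      refine ⟨h1, by omega, h3, ?_⟩
      rw [h4, sumPF_eq m hm2, hminfac]
      omega
    · have hmod : ¬ m % p = 0 := fun h => hdvd (Nat.dvd_iff_mod_eq_zero.mpr h)
      rw [if_neg hmod]
      refine ⟨hm1, le_rfl, ?_, rfl⟩
      intro q hq2 hqp1
      rcases Nat.lt_or_ge q p with h | h
      · exact hnodvd q hq2 h
      · have : q = p := by omega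
        exact this ▸ hdvd

theorem bOuter_spec : ∀ fuel m p total, 1 ≤ m → 2 ≤ p → m + 2 ≤ fuel + p →
    (∀ q, 2 ≤ q → q < p → ¬ q ∣ m) →
    pvBOuter fuel m p total = total + sumPF m := by
  intro fuel
  induction fuel with
  | zero =>
    intro m p total hm1 hp2 hfp hnodvd
    have hm : m = 1 := by
      by_contra h
      exact hnodvd m (by omega) (by omega) (dvd_refl m)
    subst hm
    simp [pvBOuter, sumPF_one]
  | succ fuel ih =>
    intro m p total hm1 hp2 hfp hnodvd
    rw [pvBOuter]
    by_cases hpp : p * p ≤ m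
    · simp only [if_pos hpp]
      obtain ⟨h1, h2, h3, h4⟩ := bInner_spec p hp2 m m total hm1 le_rfl hnodvd
      rw [ih _ (p + 1) _ h1 (by omega) (by omega) h3, h4]
    · simp only [if_neg hpp]
      rcases Nat.lt_or_ge 1 m with hm2 | hm2
      · have hminfac_ge : p ≤ m.minFac := by
          by_contra h
          exact hnodvd m.minFac (Nat.minFac_prime (by omega)).two_le (by omega) (Nat.minFac_dvd m)
        have hprime : m.Prime := by
          by_contra h
          have := Nat.minFac_sq_le_self (by omega : 0 < m) h
          nlinarith [hminfac_ge]
        rw [if_pos hm2, sumPF_prime hprime]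
      · have hm : m = 1 := by omega
        subst hm
        simp [sumPF_one]

-- ===== VERDICT (by name: the statement is the Claim_ definition above) =====
theorem minOperations_spec : Claim_equal_minOperations := by
  intro n _
  unfold Spec_minOperations minOperations minOperations_alt
  by_cases h : n ≤ 1
  · simp [h]
  · simp only [if_neg h]
    have hN : 2 ≤ n.toNat := by omega
    have hA := aLoop_spec n.toNat n.toNat 1 1 0 le_rfl le_rfl (one_dvd _) (one_dvd _)
      (by omega) (by omega)
    have hE : pvE n.toNat 1 1 = 1 := pvE_eq_self (one_dvd _) (one_dvd _) (by omega)
    rw [hA, hE] at *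
    have hB := bOuter_spec n.toNat n.toNat 2 0 (by omega) le_rfl (by omega)
      (fun q hq2 hqlt _ => by omega)
    rw [hB]
    simp
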